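-- pv_equiv track=rewrite | github.com/venil7/advent-of-code | 2021/day-3.py | calc_acc
-- ===== SOURCE A (Python) =====
-- def calc_acc(binaries: list[list[int]]) -> list[int]:
--     binary_len = len(binaries[0])
--     acc = [0] * binary_len
--     for binary in binaries:
--         for i in range(binary_len):
--             if binary[i] == 1:
--                 acc[i] += 1
--             elif binary[i] == 0:
--                 acc[i] -= 1
--     return acc
-- ===== SOURCE B (Python) =====
-- def calc_acc(binaries: list[list[int]]) -> list[int]:
--     # transpose, then count per column: (#ones - #zeros) for each column
--     return [col.count(1) - col.count(0) for col in zip(*binaries)]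
-- ===== Notes on version B (the rewrite author's own statement) =====
-- stated objective: idiomatic
-- what changed: Replaces the row-major loop of per-element +1/-1 updates into a mutable accumulator with a transpose (zip(*binaries)) followed by one counting pass per column (count(1) - count(0)).
import Mathlib
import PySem

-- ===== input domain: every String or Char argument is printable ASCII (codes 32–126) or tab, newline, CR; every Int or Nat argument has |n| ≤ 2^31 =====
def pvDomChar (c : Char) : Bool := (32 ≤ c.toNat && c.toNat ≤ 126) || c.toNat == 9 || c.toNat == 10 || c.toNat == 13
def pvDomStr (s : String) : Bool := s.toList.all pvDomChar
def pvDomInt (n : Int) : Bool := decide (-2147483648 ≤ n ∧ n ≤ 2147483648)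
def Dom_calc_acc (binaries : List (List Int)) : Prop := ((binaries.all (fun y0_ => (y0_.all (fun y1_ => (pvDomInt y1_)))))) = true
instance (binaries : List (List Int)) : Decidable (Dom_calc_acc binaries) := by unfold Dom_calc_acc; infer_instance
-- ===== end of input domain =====

-- B replaces A's row-major +1/-1 accumulator updates by a transpose followed by one
-- counting pass per column (idiomatic; same return value on Pre_).

-- ===== PORT A =====
def pyStepA (binary : List Int) (acc : List Int) (i : Nat) : List Int :=
  match PySem.List.pyGet? binary (i : Int) with
  | some v =>
      if v = 1 then acc.set i (acc.getD i 0 + 1)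
      else if v = 0 then acc.set i (acc.getD i 0 - 1)
      else acc
  | none => acc  -- Python: IndexError here (excluded by Pre_calc_acc)

def calc_acc (binaries : List (List Int)) : List Int :=
  let blen := ((PySem.List.pyGet? binaries 0).getD []).length
  binaries.foldl (fun acc binary => (List.range blen).foldl (pyStepA binary) acc)
    (List.replicate blen 0)

-- ===== PORT B =====
-- zip(*binaries): columns 0 .. (min row length) - 1
def calc_acc_alt (binaries : List (List Int)) : List Int :=
  ((List.range (((binaries.map List.length).min?).getD 0)).map
      (fun j => binaries.map (fun row => row.getD j 0))).map
    (fun col => ((col.count 1 : Nat) : Int) - ((col.count 0 : Nat) : Int))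

-- ===== PRECONDITION & SPEC =====
-- Pre_ excludes exactly the inputs where A raises IndexError: the empty list and
-- inputs with a row shorter than the first row.
def Pre_calc_acc (binaries : List (List Int)) : Prop :=
  binaries ≠ [] ∧ ∀ row ∈ binaries, (binaries.headD []).length ≤ row.length
instance (binaries : List (List Int)) : Decidable (Pre_calc_acc binaries) := by
  unfold Pre_calc_acc; infer_instance

def pvWitness_calc_acc : List (List Int) := [[1, 0, 1], [0, 0, 1], [1, 2, 0]]

def Spec_calc_acc (binaries : List (List Int)) (out : List Int) : Prop := out = calc_acc_alt binaries
instance (binaries : List (List Int)) (out : List Int) : Decidable (Spec_calc_acc binaries out) := by unfold Spec_calc_acc; infer_instance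

-- ===== CLAIM (what is proved, stated in full; the proofs are below) =====
def Claim_equal_calc_acc : Prop := ∀ (binaries : List (List Int)), Dom_calc_acc binaries → Pre_calc_acc binaries → Spec_calc_acc binaries (calc_acc binaries)

-- ===== LEMMAS AND PROOFS =====

def pvDelta (v : Int) : Int := if v = 1 then 1 else if v = 0 then -1 else 0

lemma count_sub_count (col : List Int) :
    ((col.count 1 : Nat) : Int) - ((col.count 0 : Nat) : Int) = (col.map pvDelta).sum := by
  induction col with
  | nil => simp
  | cons x t ih =>
      simp only [List.count_cons, List.map_cons, List.sum_cons]
      by_cases h1 : x = 1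
      · subst h1; simp [pvDelta]; omega
      · by_cases h0 : x = 0
        · subst h0; simp [pvDelta]; omega
        · simp [pvDelta, h1, h0]; push_cast at *; omega

lemma foldA_spec (binary : List Int) (n : Nat) (acc : List Int)
    (hb : n ≤ binary.length) (ha : n ≤ acc.length) :
    ((List.range n).foldl (pyStepA binary) acc).length = acc.length ∧
    ∀ k : Nat, ((List.range n).foldl (pyStepA binary) acc).getD k 0 =
      acc.getD k 0 + (if k < n then pvDelta (binary.getD k 0) else 0) := by
  induction n with
  | zero => simp
  | succ n ih =>
      obtain ⟨hlen, hget⟩ := ih (by omega) (by omega)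
      rw [List.range_succ, List.foldl_append, List.foldl_cons, List.foldl_nil]
      set prev := (List.range n).foldl (pyStepA binary) acc with hprev
      have hnp : n < prev.length := by omega
      have hnb : n < binary.length := by omega
      have hstep : pyStepA binary prev n =
          prev.set n (prev.getD n 0 + pvDelta (binary.getD n 0)) ∨
          (pyStepA binary prev n = prev ∧ pvDelta (binary.getD n 0) = 0) := by
        unfold pyStepA
        rw [PySem.List.pyGet?_natCast, List.getElem?_eq_getElem hnb]
        by_cases h1 : binary[n] = 1
        · left; simp [pvDelta, List.getElem?_eq_getElem hnb, h1]
        · by_cases h0 : binary[n] = 0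
          · left; simp [pvDelta, List.getElem?_eq_getElem hnb, h0, sub_eq_add_neg]
          · right; simp [pvDelta, List.getElem?_eq_getElem hnb, h1, h0]
      rcases hstep with hstep | ⟨hstep, hz⟩
      · rw [hstep]
        refine ⟨by simpa using hlen, fun k => ?_⟩
        by_cases hk : k = n
        · subst hk
          rw [List.getD_eq_getElem?_getD, List.getElem?_set_self hnp, Option.getD_some, hget k]
          simp
        · rw [List.getD_eq_getElem?_getD, List.getElem?_set_ne (fun h => hk h.symm),
            ← List.getD_eq_getElem?_getD, hget k]
          have : (k < n + 1) ↔ (k < n) := by omega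
          rw [if_congr this rfl rfl]
      · rw [hstep]
        refine ⟨hlen, fun k => ?_⟩
        rw [hget k]
        by_cases hk : k = n
        · subst hk; rw [hz]; simp
        · have : (k < n + 1) ↔ (k < n) := by omega
          rw [if_congr this rfl rfl]

lemma foldOuter_spec (blen : Nat) (rows : List (List Int))
    (hrows : ∀ r ∈ rows, blen ≤ r.length) :
    ∀ acc : List Int, acc.length = blen →
      (rows.foldl (fun acc binary => (List.range blen).foldl (pyStepA binary) acc) acc).length = blen ∧
      ∀ k, (rows.foldl (fun acc binary => (List.range blen).foldl (pyStepA binary) acc) acc).getD k 0 =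
        acc.getD k 0 + (if k < blen then (rows.map (fun r => pvDelta (r.getD k 0))).sum else 0) := by
  induction rows with
  | nil => intro acc hacc; simp [hacc]
  | cons r t ih =>
      intro acc hacc
      have hr : blen ≤ r.length := hrows r (by simp)
      obtain ⟨h1len, h1get⟩ := foldA_spec r blen acc hr (by omega)
      obtain ⟨h2len, h2get⟩ := ih (fun x hx => hrows x (by simp [hx]))
        ((List.range blen).foldl (pyStepA r) acc) (by omega)
      rw [List.foldl_cons]
      refine ⟨h2len, fun k => ?_⟩
      rw [h2get k, h1get k]
      by_cases hk : k < blen <;> (simp [hk, List.sum_cons]; try ring)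

lemma foldl_min_of_le (l : List Nat) (a : Nat) (h : ∀ x ∈ l, a ≤ x) : l.foldl min a = a := by
  induction l generalizing a with
  | nil => rfl
  | cons x t ih =>
      rw [List.foldl_cons, min_eq_left (h x (by simp))]
      exact ih a (fun y hy => h y (by simp [hy]))

theorem calc_acc_spec : Claim_equal_calc_acc := by
  intro binaries _hdom hpre
  obtain ⟨hne, hall⟩ := hpre
  obtain ⟨h, t, rfl⟩ : ∃ h t, binaries = h :: t := by
    cases binaries with
    | nil => exact absurd rfl hne
    | cons h t => exact ⟨h, t, rfl⟩
  simp only [List.headD_cons] at hall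
  unfold Spec_calc_acc calc_acc calc_acc_alt
  have hget0 : ((PySem.List.pyGet? (h :: t) 0).getD []).length = h.length := by
    simp
  rw [hget0]
  -- min of row lengths is the first row's length
  have hmin : (((h :: t).map List.length).min?).getD 0 = h.length := by
    rw [List.map_cons, List.min?_cons']
    simp only [Option.getD_some]
    exact foldl_min_of_le _ _ (fun x hx => by
      obtain ⟨r, hr, rfl⟩ := List.mem_map.mp hx
      exact hall r (by simp [hr]))
  rw [hmin]
  obtain ⟨hlen, hget⟩ := foldOuter_spec h.length (h :: t) hall
    (List.replicate h.length 0) (by simp)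
  refine List.ext_getElem (by simp only [List.length_map, List.length_range]; exact hlen)
    (fun i hi1 hi2 => ?_)
  rw [hlen] at hi1
  rw [← List.getD_eq_getElem _ 0, hget i, List.getD_eq_getElem?_getD]
  simp only [List.getElem?_replicate, if_pos hi1, Option.getD_some, zero_add]
  rw [List.getElem_map, List.getElem_map, List.getElem_range, count_sub_count, List.map_map]
  rfl

-- ===== VERDICT (by name: the statement is the Claim_ definition above) =====
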